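-- pv_equiv track=rewrite | github.com/hauteuar/research_agent | agents/code_parser_agent_simple.py | _find_paragraph
-- ===== SOURCE A (Python) =====
-- def _find_paragraph(content: str, position: int) -> str:
--     """Find containing paragraph"""
--     before_content = content[:position]
--     lines = before_content.split('\n')
--
--     for line in reversed(lines):
--         line = line.strip()
--         if line and not line.startswith('*') and line.endswith('.'):
--             # Simple paragraph detection
--             words = line.split()
--             if len(words) >= 1 and words[0].replace('-', '').isalnum():
--                 return words[0]
--
--     return 'UNKNOWN'
-- ===== SOURCE B (Python) =====
-- def _find_paragraph(content: str, position: int) -> str: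
--     """Find containing paragraph (forward scan keeping the last match)."""
--     result = 'UNKNOWN'
--     for line in content[:position].split('\n'):
--         line = line.strip()
--         if line and not line.startswith('*') and line.endswith('.'):
--             words = line.split()
--             if len(words) >= 1 and words[0].replace('-', '').isalnum():
--                 result = words[0]
--     return result
-- ===== Notes on version B (the rewrite author's own statement) =====
-- stated objective: simpler
-- what changed: Replaces the reversed-list scan with early return by a single forward pass over the lines that keeps the last matching line's first word in an accumulator initialized to 'UNKNOWN'.
import Mathlib
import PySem

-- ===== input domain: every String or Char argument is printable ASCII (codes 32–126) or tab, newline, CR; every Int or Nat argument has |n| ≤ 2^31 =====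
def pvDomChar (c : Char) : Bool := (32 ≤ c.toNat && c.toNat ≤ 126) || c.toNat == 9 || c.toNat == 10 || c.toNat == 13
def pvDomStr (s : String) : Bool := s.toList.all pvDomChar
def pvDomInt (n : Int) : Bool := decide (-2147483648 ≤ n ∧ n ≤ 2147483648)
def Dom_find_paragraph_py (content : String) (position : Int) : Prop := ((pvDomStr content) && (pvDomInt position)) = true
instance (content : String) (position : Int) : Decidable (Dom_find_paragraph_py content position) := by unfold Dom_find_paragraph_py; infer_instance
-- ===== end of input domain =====

-- B changes only the decomposition (forward accumulator pass instead of reversed-scan early return); same cost.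

-- shared per-line test, identical in both Pythons: strip; non-empty, not startswith '*',
-- endswith '.'; first word with '-' removed is alnum → that first word
def pvLineWord? (line : List Char) : Option (List Char) :=
  let l := PySem.Chars.strip line
  if !l.isEmpty && !PySem.Chars.startswith l ['*'] && PySem.Chars.endswith l ['.'] then
    let words := PySem.Chars.split₀ l
    if decide (1 ≤ words.length) &&
        PySem.Chars.strIsalnum (PySem.Chars.replace (words.headD []) ['-'] []) then
      some (words.headD [])
    else none
  else none

-- ===== PORT A =====
-- the loop over reversed(lines) with early return
def pvLoopA : List (List Char) → String
  | [] => "UNKNOWN"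
  | l :: rest =>
    match pvLineWord? l with
    | some w => String.ofList w
    | none => pvLoopA rest

def find_paragraph_py (content : String) (position : Int) : String :=
  let before := PySem.Chars.slice content.toList none (some position)
  let lines := PySem.Chars.splitOn before ['\n']
  pvLoopA lines.reverse

-- ===== PORT B =====
def find_paragraph_py_alt (content : String) (position : Int) : String :=
  let before := PySem.Chars.slice content.toList none (some position)
  let lines := PySem.Chars.splitOn before ['\n']
  lines.foldl (fun acc l =>
    match pvLineWord? l with
    | some w => String.ofList w
    | none => acc) "UNKNOWN"

-- ===== PRECONDITION & SPEC =====
def Spec_find_paragraph_py (content : String) (position : Int) (out : String) : Prop := out = find_paragraph_py_alt content position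
instance (content : String) (position : Int) (out : String) : Decidable (Spec_find_paragraph_py content position out) := by unfold Spec_find_paragraph_py; infer_instance

-- ===== CLAIM (what is proved, stated in full; the proofs are below) =====
def Claim_equal_find_paragraph_py : Prop := ∀ (content : String) (position : Int), Dom_find_paragraph_py content position → Spec_find_paragraph_py content position (find_paragraph_py content position)

-- ===== LEMMAS AND PROOFS =====

lemma pvLoopA_eq (ls : List (List Char)) :
    pvLoopA ls = ((ls.findSome? pvLineWord?).map String.ofList).getD "UNKNOWN" := by
  induction ls with
  | nil => rfl
  | cons l t ih =>
    simp only [pvLoopA, List.findSome?]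
    cases pvLineWord? l <;> simp [ih]

lemma pvFoldB_eq (ls : List (List Char)) (acc : String) :
    ls.foldl (fun acc l =>
      match pvLineWord? l with
      | some w => String.ofList w
      | none => acc) acc
      = ((ls.reverse.findSome? pvLineWord?).map String.ofList).getD acc := by
  induction ls generalizing acc with
  | nil => rfl
  | cons l t ih =>
    simp only [List.foldl, List.reverse_cons, List.findSome?_append, ih]
    cases h : t.reverse.findSome? pvLineWord? with
    | some w => simp
    | none =>
      simp only [List.findSome?]
      cases pvLineWord? l <;> simp

theorem pv_main (content : String) (position : Int) :
    find_paragraph_py content position = find_paragraph_py_alt content position := by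
  unfold find_paragraph_py find_paragraph_py_alt
  rw [pvFoldB_eq, pvLoopA_eq]

-- ===== VERDICT (by name: the statement is the Claim_ definition above) =====
theorem find_paragraph_py_spec : Claim_equal_find_paragraph_py := by
  intro content position _
  unfold Spec_find_paragraph_py
  exact pv_main content position
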